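-- pv_equiv track=rewrite | github.com/finsteininvest/mininab | mininab.py | sorted_categories
-- ===== SOURCE A (Python) =====
-- from typing import Dict, Any, List, Optional
--
-- def sorted_categories(state: Dict[str, Any]) -> List[str]:
--     cats = state.get("categories", {})
--     tree: Dict[Optional[str], List[str]] = {None: []}
--     for name, info in cats.items():
--         parent = info.get("parent")
--         tree.setdefault(parent, []).append(name)
--         tree.setdefault(name, [])
--     for k in tree:
--         tree[k].sort()
--     result: List[str] = []
--     def visit(parent: Optional[str], indent: str = ""):
--         for name in tree.get(parent, []):
--             result.append(indent + name)
--             visit(name, indent + "  ")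
--     visit(None)
--     return result
-- ===== SOURCE B (Python) =====
-- def sorted_categories(state):
--     cats = state.get("categories", {})
--     items = list(cats.items())
--
--     def kids(p):
--         return sorted(name for name, info in items if info.get("parent") == p)
--
--     result = []
--     stack = [(name, "") for name in reversed(kids(None))]
--     while stack:
--         name, indent = stack.pop()
--         result.append(indent + name)
--         stack.extend((c, indent + "  ") for c in reversed(kids(name)))
--     return result
-- ===== Notes on version B (the rewrite author's own statement) =====
-- stated objective: alternative
-- what changed: B drops A's parent->children dict entirely (no setdefault seeding, no per-bucket in-place sorts): children of a node are computed on demand by a filter-and-sort scan over the category items, and A's recursive visit() is replaced by an iterative pre-order DFS with an explicit stack of (name, indent) pairs, children pushed in reversed order.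
import Mathlib
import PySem

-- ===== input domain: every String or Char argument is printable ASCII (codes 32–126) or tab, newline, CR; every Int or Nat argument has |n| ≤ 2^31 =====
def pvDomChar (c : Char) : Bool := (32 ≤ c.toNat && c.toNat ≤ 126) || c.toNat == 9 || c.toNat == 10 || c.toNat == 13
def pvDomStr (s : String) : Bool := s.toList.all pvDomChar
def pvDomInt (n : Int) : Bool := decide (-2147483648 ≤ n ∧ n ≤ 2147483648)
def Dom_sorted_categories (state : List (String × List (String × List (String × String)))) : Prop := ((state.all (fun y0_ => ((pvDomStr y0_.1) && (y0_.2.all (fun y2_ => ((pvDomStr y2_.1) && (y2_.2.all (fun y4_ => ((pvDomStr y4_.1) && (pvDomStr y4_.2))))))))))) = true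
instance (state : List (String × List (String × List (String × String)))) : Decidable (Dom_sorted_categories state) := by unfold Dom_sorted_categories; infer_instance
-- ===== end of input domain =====

-- B drops A's parent→children dict entirely: children of a node are recomputed on demand by a
-- filter-and-sort scan over the category items, and A's recursive visit() becomes an iterative
-- pre-order DFS over an explicit stack of (name, indent) pairs; objective: alternative, same output.

-- ===== PORT A =====
-- A-side helper: the tree-building loop.  tree.setdefault(parent, []).append(name) is
-- Dict.modify parent [] (· ++ [name]) (identical entry position and final value), then
-- tree.setdefault(name, []); the initial dict is {None: []}.
def pvTreeA (cats : List (String × List (String × String))) : PySem.Dict (Option String) (List String) :=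
  cats.foldl
    (fun t nv =>
      (t.modify ((PySem.Dict.mk nv.2).get? "parent") [] (· ++ [nv.1])).setdefault (some nv.1) [])
    (PySem.Dict.mk [((none : Option String), ([] : List String))])

-- A-side helper: 'for k in tree: tree[k].sort()' — every value list sorted in place.
def pvSortedA (cats : List (String × List (String × String))) : PySem.Dict (Option String) (List String) :=
  PySem.Dict.mk ((pvTreeA cats).items.map (fun kv => (kv.1, PySem.List.sorted kv.2 (fun x => x) false)))

-- A-side helper: the recursive visit(parent, indent); each appended line is emitted in order.
-- Python's recursion carries no fuel: the fuel argument only makes the recursion total in Lean,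
-- and cats.length + 1 provably suffices (under Pre_, parent chains are simple paths).
def pvVisitA (tree : PySem.Dict (Option String) (List String)) : Nat → Option String → String → List String
  | 0, _, _ => []
  | f + 1, p, ind =>
      (tree.getD p []).flatMap (fun n => (ind ++ n) :: pvVisitA tree f (some n) (ind ++ "  "))

def sorted_categories (state : List (String × List (String × List (String × String)))) : List String :=
  let cats := (PySem.Dict.mk state).getD "categories" []
  pvVisitA (pvSortedA cats) (cats.length + 1) none ""

-- ===== PORT B =====
-- B-side helper: kids(p) = sorted(name for name, info in items if info.get("parent") == p);
-- a fresh filter-and-sort scan over the items, no dict is ever built.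
def pvKidsB (cats : List (String × List (String × String))) (p : Option String) : List String :=
  PySem.List.sorted
    ((cats.filter (fun nv => (PySem.Dict.mk nv.2).get? "parent" == p)).map (fun nv => nv.1))
    (fun x => x) false

-- B-side helper: the while-loop over the explicit stack.  The Lean list keeps the stack TOP AT ITS
-- HEAD, so Python's stack.extend(reversed(kids(...))) followed by pop()-from-the-end is prepending
-- the children in order.  The fuel only makes the loop total in Lean; (cats.length + 2) ^
-- (cats.length + 2) provably suffices under Pre_.
def pvGoB (cats : List (String × List (String × String))) :
    Nat → List (String × String) → List String → List String
  | 0, _, acc => acc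
  | _ + 1, [], acc => acc
  | f + 1, (n, ind) :: st, acc =>
      pvGoB cats f ((pvKidsB cats (some n)).map (fun c => (c, ind ++ "  ")) ++ st) (acc ++ [ind ++ n])

def sorted_categories_alt (state : List (String × List (String × List (String × String)))) : List String :=
  let cats := (PySem.Dict.mk state).getD "categories" []
  pvGoB cats ((cats.length + 2) ^ (cats.length + 2)) ((pvKidsB cats none).map (fun n => (n, ""))) []

-- ===== PRECONDITION & SPEC =====
-- Pre_ excludes association lists whose "categories" member carries a duplicate name key: such a
-- list is not representable as a Python dict (Python deduplicates on construction), and first-match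
-- association-list lookup then diverges from Python's overwrite semantics.
def Pre_sorted_categories (state : List (String × List (String × List (String × String)))) : Prop :=
  ((((PySem.Dict.mk state).getD "categories" []).map (fun nv => nv.1)).Nodup)
instance (state : List (String × List (String × List (String × String)))) : Decidable (Pre_sorted_categories state) := by unfold Pre_sorted_categories; infer_instance

def pvWitness_sorted_categories : (List (String × List (String × List (String × String)))) :=
  [("categories", [("b", [("parent", "a")]), ("a", [])])]

def Spec_sorted_categories (state : List (String × List (String × List (String × String)))) (out : List String) : Prop := out = sorted_categories_alt state
instance (state : List (String × List (String × List (String × String)))) (out : List String) : Decidable (Spec_sorted_categories state out) := by unfold Spec_sorted_categories; infer_instance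

-- ===== CLAIM (what is proved, stated in full; the proofs are below) =====
def Claim_equal_sorted_categories : Prop := ∀ (state : List (String × List (String × List (String × String)))), Dom_sorted_categories state → Pre_sorted_categories state → Spec_sorted_categories state (sorted_categories state)

-- ===== LEMMAS AND PROOFS =====

-- proof-only helper: the parent→children accumulation A performs, without the leaf/None seeding
def pvTreeP (cats : List (String × List (String × String))) : PySem.Dict (Option String) (List String) :=
  cats.foldl
    (fun t nv => t.modify ((PySem.Dict.mk nv.2).get? "parent") [] (· ++ [nv.1]))
    PySem.Dict.empty

-- proof-only helper: pvTreeP with every bucket sorted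
def pvSortedP (cats : List (String × List (String × String))) : PySem.Dict (Option String) (List String) :=
  PySem.Dict.mk ((pvTreeP cats).items.map (fun kv => (kv.1, PySem.List.sorted kv.2 (fun x => x) false)))

-- the children function both ports traverse, in dict form
def pvChildren (cats : List (String × List (String × String))) (p : Option String) : List String :=
  (pvSortedP cats).getD p []

-- the parent of a name, read off the categories dict (none when absent or without "parent" entry)
def pvPf (cats : List (String × List (String × String))) (n : String) : Option String :=
  match (PySem.Dict.mk cats).get? n with
  | some info => (PySem.Dict.mk info).get? "parent"
  | none => none

-- the lines contributed by a stack prefix: each entry's line followed by its recursive visit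
def pvFlat (cats : List (String × List (String × String))) (l : List (String × String)) : List String :=
  l.flatMap (fun e => (e.2 ++ e.1) :: pvVisitA (pvSortedP cats) (cats.length + 1) (some e.1) (e.2 ++ "  "))

theorem pvGet?_mapValues (f : List String → List String)
    (l : List ((Option String) × List String)) (p : Option String) :
    (PySem.Dict.mk (l.map (fun kv => (kv.1, f kv.2)))).get? p = ((PySem.Dict.mk l).get? p).map f := by
  induction l with
  | nil => rfl
  | cons kv rest ih =>
      obtain ⟨k, v⟩ := kv
      simp only [List.map_cons, PySem.Dict.get?_mk_cons]
      by_cases h : (k == p) = true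
      · rw [if_pos h, if_pos h]; rfl
      · rw [if_neg h, if_neg h]; exact ih
theorem pvGetD_setdefault (d : PySem.Dict (Option String) (List String)) (k p : Option String) :
    (d.setdefault k []).getD p [] = d.getD p [] := by
  by_cases h : d.contains k = true
  · rw [PySem.Dict.setdefault_of_contains d [] h]
  · rw [PySem.Dict.setdefault_of_not_contains d [] (by simpa using h)]
    rw [PySem.Dict.getD_insert]
    split_ifs with hp
    · subst hp; exact (PySem.Dict.getD_of_not_contains d [] (by simpa using h)).symm
    · rfl
theorem pvFoldAB (l : List (String × List (String × String)))
    : ∀ (tA tB : PySem.Dict (Option String) (List String)),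
      (∀ p, tA.getD p [] = tB.getD p []) → ∀ p,
      (l.foldl (fun t nv => (t.modify ((PySem.Dict.mk nv.2).get? "parent") [] (· ++ [nv.1])).setdefault (some nv.1) []) tA).getD p [] =
      (l.foldl (fun t nv => t.modify ((PySem.Dict.mk nv.2).get? "parent") [] (· ++ [nv.1])) tB).getD p [] := by
  induction l with
  | nil => intro tA tB h p; exact h p
  | cons nv rest ih =>
      intro tA tB h p
      simp only [List.foldl_cons]
      apply ih
      intro q
      rw [pvGetD_setdefault]
      rw [PySem.Dict.getD_modify, PySem.Dict.getD_modify]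
      split_ifs with hq
      · rw [h]
      · exact h q

-- getD through the value-sorting rebuild
theorem pvGetD_sortedMk (t : PySem.Dict (Option String) (List String)) (p : Option String) :
    (PySem.Dict.mk (t.items.map (fun kv => (kv.1, PySem.List.sorted kv.2 (fun x => x) false)))).getD p []
      = PySem.List.sorted (t.getD p []) (fun x => x) false := by
  rw [PySem.Dict.getD_eq_get?_getD, PySem.Dict.getD_eq_get?_getD]
  rw [pvGet?_mapValues (fun v => PySem.List.sorted v (fun x => x) false) t.items p]
  cases h : t.get? p <;> rfl

theorem pvTree_getD_eq (cats : List (String × List (String × String))) (p : Option String) :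
    (pvSortedA cats).getD p [] = pvChildren cats p := by
  unfold pvSortedA pvChildren pvSortedP
  rw [pvGetD_sortedMk, pvGetD_sortedMk]
  unfold pvTreeA pvTreeP
  rw [pvFoldAB]
  intro q
  cases q <;> rfl

theorem pvChildren_eq (cats : List (String × List (String × String))) (p : Option String) :
    pvChildren cats p = pvKidsB cats p := by
  unfold pvChildren pvSortedP pvKidsB
  rw [pvGetD_sortedMk]
  unfold pvTreeP
  have h : List.foldl (fun (d : PySem.Dict (Option String) (List String)) (pr : Option String × String) => d.modify pr.1 [] (· ++ [pr.2]))
        PySem.Dict.empty (cats.map (fun nv => ((PySem.Dict.mk nv.2).get? "parent", nv.1)))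
      = List.foldl (fun d nv => d.modify ((PySem.Dict.mk nv.2).get? "parent") [] (· ++ [nv.1])) PySem.Dict.empty cats := List.foldl_map
  rw [← h, PySem.Dict.getD_foldl_modify_append]
  simp only [List.filter_map, List.map_map, Function.comp_def, PySem.Dict.getD_empty, List.nil_append]

theorem pvChildren_length_le (cats : List (String × List (String × String))) (p : Option String) :
    (pvChildren cats p).length ≤ cats.length := by
  rw [pvChildren_eq]
  unfold pvKidsB
  rw [PySem.List.length_sorted, List.length_map]
  exact le_trans (List.length_filter_le _ _) (le_refl _)

theorem pvChildren_mem (cats : List (String × List (String × String)))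
    (hnd : ((cats.map (fun nv => nv.1)).Nodup)) {n : String} {p : Option String}
    (h : n ∈ pvChildren cats p) :
    pvPf cats n = p ∧ (PySem.Dict.mk cats).contains n = true := by
  rw [pvChildren_eq] at h
  unfold pvKidsB at h
  rw [PySem.List.mem_sorted] at h
  simp only [List.mem_map, List.mem_filter] at h
  obtain ⟨nv, ⟨hmem, hpk⟩, hn⟩ := h
  have hget : (PySem.Dict.mk cats).get? n = some nv.2 := by
    apply PySem.Dict.get?_of_mem_items
    · show (n, nv.2) ∈ cats
      rw [← hn]
      exact hmem
    · simpa [PySem.Dict.keys] using hnd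
  constructor
  · unfold pvPf
    rw [hget]
    simpa using hpk
  · rw [PySem.Dict.contains_iff_mem_keys]
    simp only [PySem.Dict.keys]
    exact List.mem_map.mpr ⟨(n, nv.2), by simpa [← hn] using hmem, rfl⟩

def pvUpPath (cats : List (String × List (String × String))) : Option String → List String → Prop
  | none, [] => True
  | some n, m :: l => n = m ∧ (PySem.Dict.mk cats).contains n = true ∧ pvUpPath cats (pvPf cats n) l
  | none, _ :: _ => False
  | some _, [] => False

theorem pvUpPath_unique (cats : List (String × List (String × String))) :
    ∀ (l l' : List String) (p : Option String), pvUpPath cats p l → pvUpPath cats p l' → l = l' := by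
  intro l
  induction l with
  | nil =>
      intro l' p h h'
      cases p with
      | none => cases l' with
        | nil => rfl
        | cons m t => exact absurd h' (by simp [pvUpPath])
      | some n => exact absurd h (by simp [pvUpPath])
  | cons m t ih =>
      intro l' p h h'
      cases p with
      | none => exact absurd h (by simp [pvUpPath])
      | some n =>
          cases l' with
          | nil => exact absurd h' (by simp [pvUpPath])
          | cons m' t' =>
              obtain ⟨rfl, _, ht⟩ := h
              obtain ⟨rfl, _, ht'⟩ := h'
              rw [ih t' (pvPf cats n) ht ht']

theorem pvUpPath_mem_suffix (cats : List (String × List (String × String))) :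
    ∀ (l : List String) (p : Option String) (c : String), pvUpPath cats p l → c ∈ l →
      ∃ pre suf, l = pre ++ c :: suf ∧ pvUpPath cats (some c) (c :: suf) := by
  intro l
  induction l with
  | nil => intro p c _ hc; cases hc
  | cons m t ih =>
      intro p c h hc
      cases p with
      | none => exact absurd h (by simp [pvUpPath])
      | some n =>
          obtain ⟨rfl, hk, ht⟩ := h
          rcases List.mem_cons.mp hc with rfl | hc'
          · exact ⟨[], t, rfl, ⟨rfl, hk, ht⟩⟩
          · obtain ⟨pre, suf, heq, hup⟩ := ih (pvPf cats n) c ht hc'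
            exact ⟨n :: pre, suf, by rw [heq]; rfl, hup⟩

theorem pvUpPath_extend (cats : List (String × List (String × String)))
    (hnd : ((cats.map (fun nv => nv.1)).Nodup)) {p : Option String} {l : List String} {c : String}
    (hp : pvUpPath cats p l) (hl : l.Nodup) (hc : c ∈ pvChildren cats p) :
    pvUpPath cats (some c) (c :: l) ∧ (c :: l).Nodup := by
  obtain ⟨hpf, hcont⟩ := pvChildren_mem cats hnd hc
  have hup : pvUpPath cats (some c) (c :: l) := ⟨rfl, hcont, by rwa [hpf]⟩
  refine ⟨hup, List.nodup_cons.mpr ⟨?_, hl⟩⟩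
  intro hmem
  obtain ⟨pre, suf, heq, hup'⟩ := pvUpPath_mem_suffix cats l p c hp hmem
  have : c :: l = c :: suf := pvUpPath_unique cats (c :: l) (c :: suf) (some c) hup hup'
  have hlen : l.length = suf.length := by
    have := congrArg List.length this
    simpa using this
  rw [heq] at hlen
  simp at hlen
  omega

theorem pvUpPath_subset_keys (cats : List (String × List (String × String))) :
    ∀ (l : List String) (p : Option String), pvUpPath cats p l →
      ∀ x ∈ l, x ∈ cats.map (fun nv => nv.1) := by
  intro l
  induction l with
  | nil => intro p _ x hx; cases hx
  | cons m t ih =>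
      intro p h x hx
      cases p with
      | none => exact absurd h (by simp [pvUpPath])
      | some n =>
          obtain ⟨rfl, hk, ht⟩ := h
          rcases List.mem_cons.mp hx with rfl | hx'
          · have := (PySem.Dict.contains_iff_mem_keys (PySem.Dict.mk cats) x).mp hk
            simpa [PySem.Dict.keys] using this
          · exact ih (pvPf cats n) ht x hx'

theorem pvUpPath_length_le (cats : List (String × List (String × String)))
    {p : Option String} {l : List String}
    (hp : pvUpPath cats p l) (hl : l.Nodup) : l.length ≤ cats.length := by
  have hsub : l ⊆ cats.map (fun nv => nv.1) := fun x hx => pvUpPath_subset_keys cats l p hp x hx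
  have := (List.subperm_of_subset hl hsub).length_le
  simpa using this

theorem pvVisit_stable (cats : List (String × List (String × String)))
    (hnd : ((cats.map (fun nv => nv.1)).Nodup)) :
    ∀ (f g : Nat) (p : Option String) (ind : String) (l : List String),
      pvUpPath cats p l → l.Nodup → cats.length + 1 - l.length ≤ f → cats.length + 1 - l.length ≤ g →
      pvVisitA (pvSortedP cats) f p ind = pvVisitA (pvSortedP cats) g p ind := by
  intro f
  induction f with
  | zero =>
      intro g p ind l hp hl hf hg
      have := pvUpPath_length_le cats hp hl
      omega
  | succ f ih =>
      intro g p ind l hp hl hf hg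
      have hlen := pvUpPath_length_le cats hp hl
      cases g with
      | zero => omega
      | succ g =>
          show (pvVisitA (pvSortedP cats) (f+1)) p ind = (pvVisitA (pvSortedP cats) (g+1)) p ind
          simp only [pvVisitA]
          apply List.flatMap_congr
          intro c hc
          have hext := pvUpPath_extend cats hnd hp hl (by exact hc)
          have hlen' := pvUpPath_length_le cats hext.1 hext.2
          rw [ih g (some c) (ind ++ "  ") (c :: l) hext.1 hext.2 (by simp at hlen' ⊢; omega) (by simp at hlen' ⊢; omega)]

theorem pvVisit_size (cats : List (String × List (String × String))) :
    ∀ (f : Nat) (p : Option String) (ind : String),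
      (pvVisitA (pvSortedP cats) f p ind).length + 1 ≤ (cats.length + 1) ^ f := by
  intro f
  induction f with
  | zero => intro p ind; simp [pvVisitA]
  | succ f ih =>
      intro p ind
      simp only [pvVisitA, List.length_flatMap]
      have hbound : ∀ x ∈ ((pvSortedP cats).getD p []).map (fun n => ((ind ++ n) :: pvVisitA (pvSortedP cats) f (some n) (ind ++ "  ")).length), x ≤ (cats.length + 1) ^ f := by
        intro x hx
        obtain ⟨n, _, rfl⟩ := List.mem_map.mp hx
        simpa using ih (some n) (ind ++ "  ")
      have hsum := List.sum_le_card_nsmul _ _ hbound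
      have hlen : (((pvSortedP cats).getD p []).map (fun n => ((ind ++ n) :: pvVisitA (pvSortedP cats) f (some n) (ind ++ "  ")).length)).length ≤ cats.length := by
        rw [List.length_map]
        exact pvChildren_length_le cats p
      have hpow : 1 ≤ (cats.length + 1) ^ f := Nat.one_le_pow _ _ (by omega)
      have : (cats.length + 1) ^ (f + 1) = (cats.length + 1) ^ f * (cats.length + 1) := pow_succ _ _
      simp only [smul_eq_mul] at hsum
      calc (List.map (fun a => ((ind ++ a) :: pvVisitA (pvSortedP cats) f (some a) (ind ++ "  ")).length) ((pvSortedP cats).getD p [])).sum + 1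
          ≤ (((pvSortedP cats).getD p []).map _).length * ((cats.length + 1) ^ f) + 1 := by exact Nat.add_le_add_right hsum 1
        _ ≤ cats.length * ((cats.length + 1) ^ f) + 1 := by exact Nat.add_le_add_right (Nat.mul_le_mul_right _ hlen) 1
        _ ≤ (cats.length + 1) ^ (f + 1) := by rw [this]; nlinarith

theorem pvFlat_children (cats : List (String × List (String × String)))
    (hnd : ((cats.map (fun nv => nv.1)).Nodup)) {p : Option String} {l : List String} (ind : String)
    (hp : pvUpPath cats p l) (hl : l.Nodup) :
    pvFlat cats ((pvChildren cats p).map (fun c => (c, ind))) =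
      pvVisitA (pvSortedP cats) (cats.length + 1) p ind := by
  unfold pvFlat
  rw [List.flatMap_map]
  show (pvChildren cats p).flatMap (fun c => (ind ++ c) :: pvVisitA (pvSortedP cats) (cats.length + 1) (some c) (ind ++ "  ")) = _
  conv_rhs => rw [pvVisitA]
  apply List.flatMap_congr
  intro c hc
  have hext := pvUpPath_extend cats hnd hp hl hc
  have hlen' := pvUpPath_length_le cats hext.1 hext.2
  rw [pvVisit_stable cats hnd (cats.length + 1) cats.length (some c) (ind ++ "  ") (c :: l) hext.1 hext.2 (by omega) (by simp only [List.length_cons] at hlen' ⊢; omega)]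

theorem pvGo_flush (cats : List (String × List (String × String)))
    (hnd : ((cats.map (fun nv => nv.1)).Nodup)) :
    ∀ (g : Nat) (l st : List (String × String)) (acc : List String),
      (∀ e ∈ l, ∃ pl, pvUpPath cats (some e.1) pl ∧ pl.Nodup) →
      (pvFlat cats l).length ≤ g →
      pvGoB cats g (l ++ st) acc =
        pvGoB cats (g - (pvFlat cats l).length) st (acc ++ pvFlat cats l) := by
  intro g
  induction g with
  | zero =>
      intro l st acc hpl hfuel
      cases l with
      | nil => simp [pvFlat]
      | cons e l' => simp [pvFlat] at hfuel
  | succ g ih =>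
      intro l st acc hpl hfuel
      cases l with
      | nil => simp [pvFlat]
      | cons e l' =>
          obtain ⟨n, ind⟩ := e
          obtain ⟨pl, hup, hplnd⟩ := hpl (n, ind) (List.mem_cons_self)
          have hfc := pvFlat_children cats hnd (ind ++ "  ") hup hplnd
          have hflatcons : pvFlat cats ((n, ind) :: l') =
              ((ind ++ n) :: pvVisitA (pvSortedP cats) (cats.length + 1) (some n) (ind ++ "  ")) ++ pvFlat cats l' := by
            simp [pvFlat]
          have hflatapp : pvFlat cats (((pvChildren cats (some n)).map (fun c => (c, ind ++ "  "))) ++ l') =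
              pvVisitA (pvSortedP cats) (cats.length + 1) (some n) (ind ++ "  ") ++ pvFlat cats l' := by
            unfold pvFlat
            rw [List.flatMap_append]
            unfold pvFlat at hfc
            rw [hfc]
          show pvGoB cats (g + 1) ((n, ind) :: (l' ++ st)) acc = _
          simp only [pvGoB]
          have hpl' : ∀ e ∈ ((pvChildren cats (some n)).map (fun c => (c, ind ++ "  "))) ++ l',
              ∃ pl, pvUpPath cats (some e.1) pl ∧ pl.Nodup := by
            intro e he
            rcases List.mem_append.mp he with hce | hle
            · obtain ⟨c, hc, rfl⟩ := List.mem_map.mp hce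
              have hext := pvUpPath_extend cats hnd hup hplnd hc
              exact ⟨c :: pl, hext.1, hext.2⟩
            · exact hpl e (List.mem_cons_of_mem _ hle)
          have hfuel' : (pvFlat cats (((pvChildren cats (some n)).map (fun c => (c, ind ++ "  "))) ++ l')).length ≤ g := by
            rw [hflatapp]
            rw [hflatcons] at hfuel
            simp at hfuel ⊢
            omega
          rw [← pvChildren_eq, ← List.append_assoc]
          rw [ih (((pvChildren cats (some n)).map (fun c => (c, ind ++ "  "))) ++ l') st (acc ++ [ind ++ n]) hpl' hfuel']
          rw [hflatapp, hflatcons]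
          congr 1
          · rw [hflatcons] at hfuel; simp only [List.length_cons, List.length_append] at hfuel ⊢; omega
          · simp

theorem pvVisit_treeAB (cats : List (String × List (String × String))) :
    ∀ (f : Nat) (p : Option String) (ind : String),
      pvVisitA (pvSortedA cats) f p ind = pvVisitA (pvSortedP cats) f p ind := by
  intro f
  induction f with
  | zero => intro p ind; rfl
  | succ f ih =>
      intro p ind
      simp only [pvVisitA]
      rw [pvTree_getD_eq cats p]
      show (pvChildren cats p).flatMap _ = (pvChildren cats p).flatMap _
      apply List.flatMap_congr
      intro c _
      rw [ih]

theorem pvGoB_nil (cats : List (String × List (String × String))) (g : Nat) (acc : List String) :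
    pvGoB cats g [] acc = acc := by
  cases g <;> rfl


-- ===== VERDICT (by name: the statement is the Claim_ definition above) =====
theorem sorted_categories_spec : Claim_equal_sorted_categories := by
  intro state _ hpre
  unfold Spec_sorted_categories sorted_categories sorted_categories_alt
  set cats := (PySem.Dict.mk state).getD "categories" [] with hcats
  have hpre' : ((cats.map (fun nv => nv.1)).Nodup) := hpre
  have hroot : pvFlat cats ((pvChildren cats none).map (fun n => (n, ""))) =
      pvVisitA (pvSortedP cats) (cats.length + 1) none "" := by
    exact pvFlat_children cats hpre' "" (by trivial) List.nodup_nil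
  have hsz := pvVisit_size cats (cats.length + 1) none ""
  have hfuel : (pvFlat cats ((pvChildren cats none).map (fun n => (n, "")))).length ≤
      (cats.length + 2) ^ (cats.length + 2) := by
    rw [hroot]
    refine le_trans (Nat.le_of_succ_le hsz) ?_
    refine le_trans (Nat.pow_le_pow_left (Nat.le_succ _) _) ?_
    exact Nat.pow_le_pow_right (by omega) (Nat.le_succ _)
  have hpaths : ∀ e ∈ (pvChildren cats none).map (fun n => (n, "")),
      ∃ pl, pvUpPath cats (some e.1) pl ∧ pl.Nodup := by
    intro e he
    obtain ⟨c, hc, rfl⟩ := List.mem_map.mp he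
    have hext := pvUpPath_extend cats hpre' (p := none) (l := []) (by trivial) List.nodup_nil hc
    exact ⟨[c], hext.1, hext.2⟩
  have hgo := pvGo_flush cats hpre' ((cats.length + 2) ^ (cats.length + 2))
      ((pvChildren cats none).map (fun n => (n, ""))) [] [] hpaths hfuel
  rw [List.append_nil] at hgo
  show pvVisitA (pvSortedA cats) (cats.length + 1) none "" =
    pvGoB cats ((cats.length + 2) ^ (cats.length + 2)) ((pvKidsB cats none).map (fun n => (n, ""))) []
  rw [← pvChildren_eq, hgo, pvGoB_nil, List.nil_append, hroot, pvVisit_treeAB]
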